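-- pv_equiv track=rewrite | github.com/Steven-J-S/webscraper | code/archive/code-only-scraper.py | anchor_tekst
-- ===== SOURCE A (Python) =====
-- def anchor_tekst(tekst):
--     t, s = '', 0
--     for x in str(tekst):
--         if x == '<':
--             s += 1
--         elif x == '>':
--             s -= 1
--         elif s == 0:
--             t += x
--     return t.lower().strip()
-- ===== SOURCE B (Python) =====
-- def anchor_tekst(tekst):
--     # Recursive segment splitter: cut at the first bracket, keep the whole
--     # leading slice when depth is 0, recurse on the remainder.
--     def go(s, depth):
--         for j, c in enumerate(s):
--             if c in '<>':
--                 head = s[:j] if depth == 0 else ''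
--                 return head + go(s[j + 1:], depth + (1 if c == '<' else -1))
--         return s if depth == 0 else ''
--     return go(str(tekst), 0).lower().strip()
-- ===== Notes on version B (the rewrite author's own statement) =====
-- stated objective: faster
-- what changed: Replaces A's single stateful per-character loop (running counter plus string concatenation) by a recursive segment splitter that cuts the string at the first bracket, keeps the whole leading slice when the depth is 0, and recurses on the remainder with the updated depth; bulk slice copies replace per-character appends.
import Mathlib
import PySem

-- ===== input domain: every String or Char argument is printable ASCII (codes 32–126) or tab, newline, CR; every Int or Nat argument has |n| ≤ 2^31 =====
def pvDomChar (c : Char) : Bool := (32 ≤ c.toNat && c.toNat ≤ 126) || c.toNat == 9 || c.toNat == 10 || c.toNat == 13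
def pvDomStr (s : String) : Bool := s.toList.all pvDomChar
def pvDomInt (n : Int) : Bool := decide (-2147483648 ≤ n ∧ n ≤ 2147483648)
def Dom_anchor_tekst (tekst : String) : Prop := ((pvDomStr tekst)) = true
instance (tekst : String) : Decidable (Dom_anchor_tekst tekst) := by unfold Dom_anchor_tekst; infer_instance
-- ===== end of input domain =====

-- B replaces A's per-character counter loop by a recursive segment splitter (cut at first bracket, keep the slice when depth is 0); objective: alternative decomposition.

-- ===== PORT A =====
-- one-loop accumulation: running counter s, string t built by concatenation
def anchorStep (st : List Char × Int) (x : Char) : List Char × Int :=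
  if x = '<' then (st.1, st.2 + 1)
  else if x = '>' then (st.1, st.2 - 1)
  else if st.2 = 0 then (st.1 ++ [x], st.2)
  else st

def anchor_tekst (tekst : String) : String :=
  let r := tekst.toList.foldl anchorStep ([], 0)
  String.ofList (PySem.Chars.strip (PySem.Chars.lower r.1))

-- ===== PORT B =====
def isBr (c : Char) : Bool := c = '<' || c = '>'

def brDelta (c : Char) : Int := if c = '<' then 1 else -1

-- go: find the first bracket (enumerate scan = takeWhile/dropWhile split),
-- keep the leading slice when depth = 0, recurse on the rest
def anchorGo (s : List Char) (depth : Int) : List Char :=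
  match _h : s.dropWhile (fun c => !isBr c) with
  | [] => if depth = 0 then s else []
  | c :: tl =>
    (if depth = 0 then s.takeWhile (fun c => !isBr c) else []) ++ anchorGo tl (depth + brDelta c)
termination_by s.length
decreasing_by
  have hle : (s.dropWhile (fun c => !isBr c)).length ≤ s.length := s.length_dropWhile_le _
  rw [_h] at hle; simp at hle ⊢; omega

def anchor_tekst_alt (tekst : String) : String :=
  String.ofList (PySem.Chars.strip (PySem.Chars.lower (anchorGo tekst.toList 0)))

-- ===== PRECONDITION & SPEC =====
def Spec_anchor_tekst (tekst : String) (out : String) : Prop := out = anchor_tekst_alt tekst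
instance (tekst : String) (out : String) : Decidable (Spec_anchor_tekst tekst out) := by unfold Spec_anchor_tekst; infer_instance

-- ===== CLAIM (what is proved, stated in full; the proofs are below) =====
def Claim_equal_anchor_tekst : Prop := ∀ (tekst : String), Dom_anchor_tekst tekst → Spec_anchor_tekst tekst (anchor_tekst tekst)

-- ===== LEMMAS AND PROOFS =====
-- A's loop over a bracket-free prefix just appends it (when depth 0) or skips it
theorem foldl_nobr (pre : List Char) (h : ∀ c ∈ pre, isBr c = false) (t : List Char) (d : Int) :
    pre.foldl anchorStep (t, d) = (t ++ (if d = 0 then pre else []), d) := by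
  induction pre generalizing t with
  | nil => simp
  | cons c cs ih =>
    have hc := h c (by simp)
    simp [isBr] at hc
    have hcs : ∀ c ∈ cs, isBr c = false := fun c hm => h c (by simp [hm])
    simp only [List.foldl_cons]
    have hstep : anchorStep (t, d) c = (t ++ (if d = 0 then [c] else []), d) := by
      by_cases hd : d = 0 <;> simp [anchorStep, hc.1, hc.2, hd]
    rw [hstep, ih hcs]
    by_cases hd : d = 0 <;> simp [hd]

-- A's loop equals B's segment recursion
theorem anchor_loop_eq (n : ℕ) : ∀ (s : List Char), s.length ≤ n → ∀ (t : List Char) (d : Int),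
    (s.foldl anchorStep (t, d)).1 = t ++ anchorGo s d := by
  induction n with
  | zero =>
    intro s hs t d
    have : s = [] := List.eq_nil_of_length_eq_zero (Nat.le_zero.mp hs)
    subst this; simp [anchorGo]
  | succ n ih =>
    intro s hs t d
    rw [anchorGo]
    have hsplit := s.takeWhile_append_dropWhile (p := fun c => !isBr c)
    cases hdrop : s.dropWhile (fun c => !isBr c) with
    | nil =>
      -- no bracket: s is all non-bracket
      rw [hdrop] at hsplit; simp at hsplit
      simp [foldl_nobr s hsplit t d]
    | cons c tl =>
      have hc : isBr c = true := by
        have := List.head?_dropWhile_not (fun c => !isBr c) s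
        rw [hdrop] at this; simpa using this
      rw [hdrop] at hsplit
      have hpre : ∀ x ∈ s.takeWhile (fun c => !isBr c), isBr x = false := by
        intro x hm
        have := List.mem_takeWhile_imp hm
        simpa using this
      -- length bound for the recursive call
      have hlen : tl.length < s.length := by
        have hle : (s.dropWhile (fun c => !isBr c)).length ≤ s.length := s.length_dropWhile_le _
        rw [hdrop] at hle; simp at hle; omega
      have htl : tl.length ≤ n := by omega
      calc (s.foldl anchorStep (t, d)).1
          = ((s.takeWhile (fun c => !isBr c) ++ c :: tl).foldl anchorStep (t, d)).1 := by rw [hsplit]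
        _ = t ++ (if d = 0 then s.takeWhile (fun c => !isBr c) else []) ++ anchorGo tl (d + brDelta c) := by
            rw [List.foldl_append, foldl_nobr _ hpre t d]
            simp only [List.foldl_cons]
            have hstep : anchorStep (t ++ (if d = 0 then s.takeWhile (fun c => !isBr c) else []), d) c
                = (t ++ (if d = 0 then s.takeWhile (fun c => !isBr c) else []), d + brDelta c) := by
              simp [isBr] at hc
              rcases hc with h1 | h2
              · simp [anchorStep, h1, brDelta]
              · by_cases h1 : c = '<'
                · simp [anchorStep, h1, brDelta]
                · simp [anchorStep, h2, brDelta, sub_eq_add_neg]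
            rw [hstep, ih tl htl]
        _ = t ++ ((if d = 0 then s.takeWhile (fun c => !isBr c) else []) ++ anchorGo tl (d + brDelta c)) := by
            simp

-- ===== VERDICT (by name: the statement is the Claim_ definition above) =====
theorem anchor_tekst_spec : Claim_equal_anchor_tekst := by
  intro tekst _
  unfold Spec_anchor_tekst anchor_tekst anchor_tekst_alt
  simp [anchor_loop_eq tekst.toList.length tekst.toList le_rfl]
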